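-- pv_equiv track=rewrite | github.com/Shardvex/weasel | weasel.py | naturally_select
-- ===== SOURCE A (Python) =====
-- goal_organism = 'METHINKS IT IS A WEASEL'
--
-- def naturally_select(organisms): #returns most "fit" organism. The rest are discarded (they die off)
--     fittest_organism = 0
--     fittest_organism_code = ''
--     for child in organisms:
--         fittness = 0
--         for x in range(len(child)):
--             if child[x-1] == goal_organism[x-1]:
--                 fittness += 1
--         if fittness >= fittest_organism:
--             fittest_organism = fittness
--             fittest_organism_code = child
--     return fittest_organism_code
-- ===== SOURCE B (Python) =====
-- goal_organism = 'METHINKS IT IS A WEASEL'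
--
-- def _fitness(child):
--     fittness = 0
--     for x in range(len(child)):
--         if child[x-1] == goal_organism[x-1]:
--             fittness += 1
--     return fittness
--
-- def naturally_select(organisms):
--     if not organisms:
--         return ''
--     best = max(_fitness(child) for child in organisms)
--     for child in reversed(organisms):
--         if _fitness(child) == best:
--             return child
-- ===== Notes on version B (the rewrite author's own statement) =====
-- stated objective: simpler
-- what changed: A's single-pass running max with >= tie-break is replaced by two explicit passes: compute the maximum fitness with max(), then scan the organisms in reverse and return the first one attaining it (the last maximal organism), with an explicit empty-list case.
import Mathlib
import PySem

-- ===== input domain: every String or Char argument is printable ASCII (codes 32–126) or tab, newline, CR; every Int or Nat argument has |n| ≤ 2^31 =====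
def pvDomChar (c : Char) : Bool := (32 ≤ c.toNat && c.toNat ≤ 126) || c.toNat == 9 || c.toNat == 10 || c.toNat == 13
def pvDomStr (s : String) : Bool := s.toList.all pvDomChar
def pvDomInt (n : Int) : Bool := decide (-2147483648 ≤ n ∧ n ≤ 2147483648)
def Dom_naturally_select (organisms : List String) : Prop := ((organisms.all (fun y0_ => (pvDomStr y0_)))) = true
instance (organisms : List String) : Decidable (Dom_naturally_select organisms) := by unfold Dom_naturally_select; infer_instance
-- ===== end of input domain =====

-- B replaces A's single running-max pass (>= tie-break) by two passes: max() of the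
-- fitness values, then a reverse scan returning the first organism attaining it.
-- Both Pythons share the same fitness loop (including its x-1 indexing quirk).

-- ===== PORT A =====
def pvGoalOrganism : String := "METHINKS IT IS A WEASEL"

-- fitness loop shared verbatim by A and by Source B's `_fitness`
def pyFitness (child : String) : Int :=
  (PySem.List.pyRange 0 (PySem.Str.len child) 1).foldl
    (fun acc x =>
      if PySem.Str.pyGet? child (x - 1) = PySem.Str.pyGet? pvGoalOrganism (x - 1) then acc + 1
      else acc) 0

def naturally_select (organisms : List String) : String :=
  (organisms.foldl
    (fun st child =>
      let fittness := pyFitness child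
      if st.1 ≤ fittness then (fittness, child) else st)
    ((0 : Int), "")).2

-- ===== PORT B =====
def naturally_select_alt (organisms : List String) : String :=
  if organisms.isEmpty then ""
  else
    match PySem.List.max? (organisms.map pyFitness) (fun v => v) with
    | some best => (organisms.reverse.find? (fun child => pyFitness child == best)).getD ""
    | none => ""

-- ===== PRECONDITION & SPEC =====
-- Pre_ excludes exactly the inputs where A raises IndexError: a child of length ≥ 25
-- makes goal_organism[x-1] (len 23) go out of range. B raises there too.
def Pre_naturally_select (organisms : List String) : Prop :=
  ∀ c ∈ organisms, PySem.Str.len c ≤ 24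

instance (organisms : List String) : Decidable (Pre_naturally_select organisms) := by
  unfold Pre_naturally_select; infer_instance

def pvWitness_naturally_select : List String := ["METHINKS", "AB", "METHINKS IT IS A WEASEL"]

def Spec_naturally_select (organisms : List String) (out : String) : Prop := out = naturally_select_alt organisms
instance (organisms : List String) (out : String) : Decidable (Spec_naturally_select organisms out) := by unfold Spec_naturally_select; infer_instance

-- ===== CLAIM (what is proved, stated in full; the proofs are below) =====
def Claim_equal_naturally_select : Prop := ∀ (organisms : List String), Dom_naturally_select organisms → Pre_naturally_select organisms → Spec_naturally_select organisms (naturally_select organisms)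

-- ===== LEMMAS AND PROOFS =====

theorem pyFitness_nonneg (c : String) : 0 ≤ pyFitness c := by
  unfold pyFitness
  rw [PySem.List.foldl_ite_add_one]
  positivity

-- A's loop computes the running max of the fitnesses together with the LAST organism
-- attaining it (>= tie-break), i.e. the first hit of a reverse scan.
theorem a_fold_char (l : List String) :
    l.foldl
      (fun st child =>
        let fittness := pyFitness child
        if st.1 ≤ fittness then (fittness, child) else st)
      ((0 : Int), "")
    = ((l.map pyFitness).foldl max 0,
       (l.reverse.find? (fun child =>
          pyFitness child == (l.map pyFitness).foldl max 0)).getD "") := by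
  induction l using List.reverseRecOn with
  | nil => simp
  | append_singleton t x ih =>
      rw [List.foldl_append, ih]
      simp only [List.map_append, List.foldl_append, List.map_cons, List.map_nil,
        List.foldl_cons, List.foldl_nil, List.reverse_append, List.reverse_cons,
        List.reverse_nil, List.nil_append, List.cons_append, List.find?_cons]
      by_cases h : (t.map pyFitness).foldl max 0 ≤ pyFitness x
      · have hm : max ((t.map pyFitness).foldl max 0) (pyFitness x) = pyFitness x :=
          max_eq_right h
        simp [h]
      · have hm : max ((t.map pyFitness).foldl max 0) (pyFitness x)
            = (t.map pyFitness).foldl max 0 := max_eq_left (by omega)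
        have hne : (pyFitness x == (t.map pyFitness).foldl max 0) = false := by
          simp; omega
        simp [h, hm, hne]

theorem naturally_select_spec : Claim_equal_naturally_select := by
  intro organisms _ _
  unfold Spec_naturally_select naturally_select naturally_select_alt
  cases organisms with
  | nil => simp
  | cons a t =>
      rw [a_fold_char]
      have hmax : PySem.List.max? ((a :: t).map pyFitness) (fun v => v)
          = some ((t.map pyFitness).foldl max (pyFitness a)) := by
        rw [List.map_cons, PySem.List.max?_id_cons]
      have hz : ((a :: t).map pyFitness).foldl max 0
          = (t.map pyFitness).foldl max (pyFitness a) := by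
        rw [List.map_cons, List.foldl_cons, max_eq_right (pyFitness_nonneg a)]
      simp only [List.isEmpty_cons, if_neg (by simp : ¬ (false = true)), hmax, hz]
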